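-- pv_equiv track=rewrite | github.com/ElMiho/fagprojekt-01666 | code/model/tokenizeInput.py | countUniqe
-- ===== SOURCE A (Python) =====
-- def countUniqe(A):
--     '''
--
--     Parameters
--     ----------
--     A : array
--
--     Returns
--     -------
--     count : int
--         number of uniqe numbers in an array
--
--     '''
--
--     if (len(A) != 0):
--         count = 1
--     else:
--         count = 0
--
--     for i in range(1, len(A)):
--         if (A[i] != A[i-1]):
--             count += 1
--     return count
-- ===== SOURCE B (Python) =====
-- def countUniqe(A):
--     # Divide and conquer: runs(lo, hi) = number of maximal equal-runs in A[lo:hi].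
--     # Merge rule: runs(lo,mid) + runs(mid,hi), minus 1 if the run crosses the split.
--     def runs(lo, hi):
--         if hi - lo == 1:
--             return 1
--         mid = (lo + hi) // 2
--         return runs(lo, mid) + runs(mid, hi) - (1 if A[mid] == A[mid - 1] else 0)
--     return runs(0, len(A)) if A else 0
-- ===== Notes on version B (the rewrite author's own statement) =====
-- stated objective: alternative
-- what changed: Replaces A's single left-to-right index scan with a divide-and-conquer recursion: split the array at the midpoint, count runs in each half, and subtract 1 when a run crosses the split boundary.
import Mathlib
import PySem

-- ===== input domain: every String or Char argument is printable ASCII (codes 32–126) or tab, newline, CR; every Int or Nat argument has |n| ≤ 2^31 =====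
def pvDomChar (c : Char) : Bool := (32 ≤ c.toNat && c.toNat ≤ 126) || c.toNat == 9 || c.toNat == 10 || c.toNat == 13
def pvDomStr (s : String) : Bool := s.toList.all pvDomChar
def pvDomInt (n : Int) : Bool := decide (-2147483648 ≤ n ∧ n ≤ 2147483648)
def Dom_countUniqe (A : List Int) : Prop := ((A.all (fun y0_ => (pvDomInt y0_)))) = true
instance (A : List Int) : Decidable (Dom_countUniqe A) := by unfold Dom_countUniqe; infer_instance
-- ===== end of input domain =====

-- B replaces A's left-to-right index scan with a divide-and-conquer recursion (split at midpoint,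
-- add the two halves' run counts, subtract 1 when a run crosses the split); objective: alternative.

-- ===== PORT A =====
def countUniqe (A : List Int) : Int :=
  let count : Int := if A.length ≠ 0 then 1 else 0
  (PySem.List.pyRange 1 A.length 1).foldl
    (fun count i =>
      if PySem.List.pyGetD A i 0 ≠ PySem.List.pyGetD A (i - 1) 0 then count + 1 else count)
    count

-- ===== PORT B =====
-- runs(lo, hi): number of maximal equal-runs in A[lo:hi]; lo/hi are Nat (Python only calls it
-- with 0 ≤ lo < hi ≤ len(A), so Nat '/ 2' is exactly Python's '(lo + hi) // 2').
def pvRuns (A : List Int) (lo hi : Nat) : Int :=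
  -- guard 'hi - lo ≤ 1' (vs Python's 'hi - lo == 1') only for totality: Python calls runs only with lo < hi
  if hi - lo ≤ 1 then 1
  else
    pvRuns A lo ((lo + hi) / 2) + pvRuns A ((lo + hi) / 2) hi -
      (if PySem.List.pyGetD A (((lo + hi) / 2 : Nat) : Int) 0
          = PySem.List.pyGetD A ((((lo + hi) / 2 : Nat) : Int) - 1) 0 then 1 else 0)
termination_by hi - lo
decreasing_by all_goals omega

def countUniqe_alt (A : List Int) : Int :=
  if A.length ≠ 0 then pvRuns A 0 A.length else 0

-- ===== PRECONDITION & SPEC =====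
def Spec_countUniqe (A : List Int) (out : Int) : Prop := out = countUniqe_alt A
instance (A : List Int) (out : Int) : Decidable (Spec_countUniqe A out) := by unfold Spec_countUniqe; infer_instance

-- ===== CLAIM (what is proved, stated in full; the proofs are below) =====
def Claim_equal_countUniqe : Prop := ∀ (A : List Int), Dom_countUniqe A → Spec_countUniqe A (countUniqe A)

-- ===== LEMMAS AND PROOFS =====

-- sum of the 0/1 boundary indicators over indices a ≤ i < b
def pvS (A : List Int) (a b : Int) : Int :=
  ((PySem.List.pyRange a b 1).map
    (fun i => if PySem.List.pyGetD A i 0 ≠ PySem.List.pyGetD A (i - 1) 0 then (1 : Int) else 0)).sum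

theorem pvRuns_eq (A : List Int) : ∀ n lo hi, hi - lo = n → lo < hi →
    pvRuns A lo hi = 1 + pvS A ((lo : Int) + 1) (hi : Int) := by
  intro n
  induction n using Nat.strong_induction_on with
  | _ n ih =>
    intro lo hi hn hlt
    rw [pvRuns]
    by_cases hbase : hi - lo ≤ 1
    · rw [if_pos hbase]
      have : (hi : Int) ≤ (lo : Int) + 1 := by omega
      simp [pvS, PySem.List.pyRange_one_eq_nil this]
    · rw [if_neg hbase]
      have h2 : lo + 2 ≤ hi := by omega
      set mid := (lo + hi) / 2 with hmid
      have hm1 : lo < mid := by omega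
      have hm2 : mid < hi := by omega
      have ihl := ih (mid - lo) (by omega) lo mid rfl hm1
      have ihr := ih (hi - mid) (by omega) mid hi rfl hm2
      rw [ihl, ihr]
      have hsplit : pvS A ((lo : Int) + 1) (hi : Int)
          = pvS A ((lo : Int) + 1) (mid : Int) + pvS A (mid : Int) ((hi : Int)) := by
        unfold pvS
        rw [PySem.List.pyRange_one_append ((lo : Int) + 1) (mid : Int) (hi : Int)
          (by omega) (by omega), List.map_append, List.sum_append]
      have hmidterm : pvS A (mid : Int) ((mid : Int) + 1)
          = (if PySem.List.pyGetD A (mid : Int) 0 ≠ PySem.List.pyGetD A ((mid : Int) - 1) 0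
             then (1 : Int) else 0) := by
        unfold pvS
        rw [PySem.List.pyRange_one_singleton]
        simp
      have hsplit2 : pvS A (mid : Int) ((hi : Int))
          = pvS A (mid : Int) ((mid : Int) + 1) + pvS A ((mid : Int) + 1) (hi : Int) := by
        unfold pvS
        rw [PySem.List.pyRange_one_append (mid : Int) ((mid : Int) + 1) (hi : Int)
          (by omega) (by omega), List.map_append, List.sum_append]
      rw [hsplit, hsplit2, hmidterm]
      by_cases heq : PySem.List.pyGetD A (mid : Int) 0 = PySem.List.pyGetD A ((mid : Int) - 1) 0
      · rw [if_pos heq, if_neg (not_not_intro heq)]; ring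
      · rw [if_neg heq, if_pos heq]; ring

theorem countUniqe_eq_S (A : List Int) (h : A.length ≠ 0) :
    countUniqe A = 1 + pvS A 1 (A.length : Int) := by
  unfold countUniqe
  rw [if_pos (by exact_mod_cast h)]
  have hfun : (fun (count : Int) (i : Int) =>
      if PySem.List.pyGetD A i 0 ≠ PySem.List.pyGetD A (i - 1) 0 then count + 1 else count)
      = (fun (count : Int) (i : Int) => count +
        (if PySem.List.pyGetD A i 0 ≠ PySem.List.pyGetD A (i - 1) 0 then (1 : Int) else 0)) := by
    funext c i; split_ifs <;> ring
  rw [hfun, PySem.List.foldl_add]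
  rfl

-- ===== VERDICT (by name: the statement is the Claim_ definition above) =====
theorem countUniqe_spec : Claim_equal_countUniqe := by
  intro A _
  unfold Spec_countUniqe countUniqe_alt
  by_cases h : A.length = 0
  · simp [h, countUniqe, PySem.List.pyRange_one_eq_nil]
  · rw [if_pos (by exact_mod_cast h)]
    rw [countUniqe_eq_S A h, pvRuns_eq A A.length 0 A.length rfl (by omega)]
    norm_num
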